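-- pv_equiv track=rewrite | github.com/dellsystem/dellsystem.github.io | code/picode/picode_utils.py | generate_fibonacci
-- ===== SOURCE A (Python) =====
-- def generate_fibonacci(num_digits, reverse):
-- 	# One digit per list index; plaintext must have len >= 1
-- 	sequence = ['1']
-- 	two_previous = 0
-- 	previous = 1
-- 	while len(sequence) < num_digits:
-- 		this = previous + two_previous
-- 		for digit in str(this):
-- 			sequence.append(digit)
-- 			if len(sequence) == num_digits:
-- 				break # So that we don't get too many
-- 		two_previous = previous
-- 		previous = this
--
-- 	to_return = ''.join(sequence)
-- 	if reverse:
-- 		return to_return[::-1]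
-- 	else:
-- 		return to_return
-- ===== SOURCE B (Python) =====
-- def generate_fibonacci(num_digits, reverse):
-- 	# Two staged passes instead of one interleaved loop:
-- 	# Pass 1 only COUNTS how many Fibonacci terms are needed, tracking an
-- 	# integer digit tally (no string is accumulated, nothing is truncated).
-- 	k = 0
-- 	tally = 1
-- 	a, b = 0, 1
-- 	while tally < num_digits:
-- 		a, b = b, a + b
-- 		tally += len(str(b))
-- 		k += 1
-- 	# Pass 2 regenerates exactly k terms with a bounded for-loop, formats
-- 	# them into a parts list, and forms the result with one join and one slice.
-- 	parts = ['1']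
-- 	a, b = 0, 1
-- 	for _ in range(k):
-- 		a, b = b, a + b
-- 		parts.append(str(b))
-- 	result = ''.join(parts)[:max(1, num_digits)]
-- 	return result[::-1] if reverse else result
-- ===== Notes on version B (the rewrite author's own statement) =====
-- stated objective: alternative
-- what changed: B replaces A's single interleaved loop (append digits one by one with a mid-number break) by two staged passes: a counting pass that only tallies digit totals to find the number of Fibonacci terms needed, then a bounded for-loop that regenerates and formats exactly those terms, with one join and one final slice.
import Mathlib
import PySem

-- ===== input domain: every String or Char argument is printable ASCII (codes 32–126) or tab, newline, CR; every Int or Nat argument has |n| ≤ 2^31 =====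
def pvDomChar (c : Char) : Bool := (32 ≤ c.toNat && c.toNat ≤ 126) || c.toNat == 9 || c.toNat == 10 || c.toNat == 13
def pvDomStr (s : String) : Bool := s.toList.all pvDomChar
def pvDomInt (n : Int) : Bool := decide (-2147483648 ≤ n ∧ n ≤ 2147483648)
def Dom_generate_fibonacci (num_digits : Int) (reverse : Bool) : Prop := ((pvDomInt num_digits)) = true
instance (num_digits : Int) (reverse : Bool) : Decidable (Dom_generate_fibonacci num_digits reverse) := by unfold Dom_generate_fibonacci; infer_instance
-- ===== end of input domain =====

-- B splits A's interleaved generate/format/truncate loop into two staged passes: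
-- a counting pass (digit tally only) and a bounded emission pass with one join
-- and one slice (objective: alternative decomposition).

-- Termination helpers for the ports (cited by the ports' decreasing_by; str(n) is never empty).
theorem pvToDigitsCore_len_ge (b : Nat) (f : Nat) : ∀ (n : Nat) (l : List Char), l.length ≤ (Nat.toDigitsCore b f n l).length := by
  induction f with
  | zero => intro n l; simp [Nat.toDigitsCore]
  | succ f ih =>
    intro n l
    simp only [Nat.toDigitsCore]
    split
    · simp
    · calc l.length ≤ (Nat.digitChar (n % b) :: l).length := by simp
           _ ≤ _ := ih _ _

theorem pvToDigits_ne_nil (b n : Nat) : Nat.toDigits b n ≠ [] := by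
  unfold Nat.toDigits
  simp only [Nat.toDigitsCore]
  split
  · simp
  · intro h
    have := pvToDigitsCore_len_ge b n (n / b) [Nat.digitChar (n % b)]
    rw [h] at this; simp at this

theorem pvToChars_ne_nil (n : Int) : PySem.Int.toChars n ≠ [] := by
  unfold PySem.Int.toChars
  split
  · simp
  · exact pvToDigits_ne_nil 10 n.toNat

-- ===== PORT A =====
-- inner 'for digit in str(this): sequence.append(digit); if len(sequence) == num_digits: break'
def pvInnerA (num_digits : Int) (seq : List Char) (ds : List Char) : List Char :=
  match ds with
  | [] => seq
  | d :: rest =>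
    let seq' := seq ++ [d]
    if (seq'.length : Int) == num_digits then seq' else pvInnerA num_digits seq' rest

theorem pvInnerA_len_ge (num_digits : Int) : ∀ (ds seq : List Char), seq.length ≤ (pvInnerA num_digits seq ds).length := by
  intro ds
  induction ds with
  | nil => intro seq; simp [pvInnerA]
  | cons d rest ih =>
    intro seq
    simp only [pvInnerA]
    split
    · simp
    · calc seq.length ≤ (seq ++ [d]).length := by simp
           _ ≤ _ := ih (seq ++ [d])

theorem pvInnerA_len_gt (num_digits : Int) (seq : List Char) (ds : List Char) (h : ds ≠ []) :
    seq.length < (pvInnerA num_digits seq ds).length := by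
  match ds with
  | [] => exact absurd rfl h
  | d :: rest =>
    simp only [pvInnerA]
    split
    · simp
    · calc seq.length < (seq ++ [d]).length := by simp
           _ ≤ _ := pvInnerA_len_ge num_digits rest (seq ++ [d])

-- 'while len(sequence) < num_digits: this = previous + two_previous; <inner loop>; shift state'
def pvFibA (num_digits : Int) (seq : List Char) (two_previous previous : Int) : List Char :=
  if h : (seq.length : Int) < num_digits then
    pvFibA num_digits (pvInnerA num_digits seq (PySem.Int.toChars (previous + two_previous))) previous (previous + two_previous)
  else seq
termination_by num_digits.toNat - seq.length
decreasing_by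
  have h1 := pvInnerA_len_gt num_digits seq (PySem.Int.toChars (previous + two_previous)) (pvToChars_ne_nil _)
  omega

def generate_fibonacci (num_digits : Int) (reverse : Bool) : String :=
  let sequence := pvFibA num_digits ['1'] 0 1
  let to_return := String.mk sequence          -- ''.join(sequence)
  if reverse then String.mk sequence.reverse   -- to_return[::-1] is exactly reversal
  else to_return

-- ===== PORT B =====
-- Pass 1: 'while tally < num_digits: a, b = b, a + b; tally += len(str(b)); k += 1' — returns k
def pvCountB (num_digits : Int) (tally : Int) (a b : Int) : Nat :=
  if h : tally < num_digits then
    pvCountB num_digits (tally + ((PySem.Int.toChars (a + b)).length : Int)) b (a + b) + 1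
  else 0
termination_by (num_digits - tally).toNat
decreasing_by
  have h1 := List.length_pos_of_ne_nil (pvToChars_ne_nil (a + b))
  omega

-- Pass 2: 'for _ in range(k): a, b = b, a + b; parts.append(str(b))' — returns parts
def pvEmitB : Nat → Int → Int → List (List Char) → List (List Char)
  | 0, _, _, parts => parts
  | k + 1, a, b, parts => pvEmitB k b (a + b) (parts ++ [PySem.Int.toChars (a + b)])

def generate_fibonacci_alt (num_digits : Int) (reverse : Bool) : String :=
  let k := pvCountB num_digits 1 0 1
  let parts := pvEmitB k 0 1 [['1']]
  let result := parts.flatten.take (max 1 num_digits).toNat  -- ''.join(parts)[:max(1, num_digits)], nonnegative bound so a plain prefix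
  if reverse then String.mk result.reverse                   -- result[::-1]
  else String.mk result

-- ===== PRECONDITION & SPEC =====
def Spec_generate_fibonacci (num_digits : Int) (reverse : Bool) (out : String) : Prop := out = generate_fibonacci_alt num_digits reverse
instance (num_digits : Int) (reverse : Bool) (out : String) : Decidable (Spec_generate_fibonacci num_digits reverse out) := by unfold Spec_generate_fibonacci; infer_instance

-- ===== CLAIM (what is proved, stated in full; the proofs are below) =====
def Claim_equal_generate_fibonacci : Prop := ∀ (num_digits : Int) (reverse : Bool), Dom_generate_fibonacci num_digits reverse → Spec_generate_fibonacci num_digits reverse (generate_fibonacci num_digits reverse)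

-- ===== LEMMAS AND PROOFS =====

-- Proof-side reference loop: append whole str(this) per round, no truncation.
-- Both ports are related to this single loop below.
def pvFibRef (num_digits : Int) (s : List Char) (tp p : Int) : List Char :=
  if h : (s.length : Int) < num_digits then
    pvFibRef num_digits (s ++ PySem.Int.toChars (p + tp)) p (p + tp)
  else s
termination_by num_digits.toNat - s.length
decreasing_by
  have h1 := List.length_pos_of_ne_nil (pvToChars_ne_nil (p + tp))
  simp only [List.length_append]
  omega

-- While the sequence is still short, A's break-at-num_digits inner append of the
-- digits of one number is exactly "append all, keep the first num_digits".
theorem pvInnerA_eq_take (n : Int) : ∀ (ds seq : List Char), (seq.length : Int) < n →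
    pvInnerA n seq ds = (seq ++ ds).take n.toNat := by
  intro ds
  induction ds with
  | nil =>
    intro seq h
    have hle : seq.length ≤ n.toNat := by omega
    simp [pvInnerA, List.take_of_length_le hle]
  | cons d rest ih =>
    intro seq h
    simp only [pvInnerA]
    split
    · next heq =>
      have hlen : (seq ++ [d]).length = n.toNat := by
        have := (beq_iff_eq).mp heq
        simp only [List.length_append, List.length_cons, List.length_nil] at this ⊢
        omega
      rw [show seq ++ d :: rest = (seq ++ [d]) ++ rest by simp]
      rw [← hlen, List.take_left]
    · next hne =>
      have h' : (((seq ++ [d]).length : Int)) < n := by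
        have hne' : ¬ (((seq ++ [d]).length : Int) = n) := by
          intro hc; exact hne (beq_iff_eq.mpr hc)
        simp only [List.length_append, List.length_cons, List.length_nil] at hne' ⊢
        push_cast at hne' ⊢
        omega
      rw [ih (seq ++ [d]) h']
      congr 1
      simp

-- Joint loop invariant: while the sequence is shorter than num_digits A's loop
-- and the reference loop hold the same state, and A's final sequence is the
-- num_digits-prefix of the reference loop's result.
theorem pvFibA_eq_ref (n : Int) : ∀ (k : Nat) (seq : List Char) (tp p : Int),
    n.toNat - seq.length ≤ k → (seq.length : Int) < n →
    pvFibA n seq tp p = (pvFibRef n seq tp p).take n.toNat := by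
  intro k
  induction k with
  | zero =>
    intro seq tp p hk h
    omega
  | succ k ih =>
    intro seq tp p hk h
    rw [pvFibA, pvFibRef]
    simp only [h, dif_pos]
    have hdne : PySem.Int.toChars (p + tp) ≠ [] := pvToChars_ne_nil _
    have hdpos : 0 < (PySem.Int.toChars (p + tp)).length := List.length_pos_of_ne_nil hdne
    rw [pvInnerA_eq_take n (PySem.Int.toChars (p + tp)) seq h]
    by_cases h2 : (((seq ++ PySem.Int.toChars (p + tp)).length : Int)) < n
    · have htk : (seq ++ PySem.Int.toChars (p + tp)).take n.toNat
          = seq ++ PySem.Int.toChars (p + tp) := by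
        apply List.take_of_length_le; omega
      rw [htk]
      apply ih
      · simp only [List.length_append]; omega
      · exact h2
    · have hlen : ((seq ++ PySem.Int.toChars (p + tp)).take n.toNat).length = n.toNat := by
        simp only [List.length_take, List.length_append]
        simp only [List.length_append] at h2
        omega
      rw [pvFibA, pvFibRef]
      have hA : ¬ ((((seq ++ PySem.Int.toChars (p + tp)).take n.toNat).length : Int) < n) := by
        rw [hlen]; omega
      simp only [hA, dif_neg, not_false_iff, h2]

theorem pvKeyA (n : Int) : pvFibA n ['1'] 0 1 = (pvFibRef n ['1'] 0 1).take (max 1 n).toNat := by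
  by_cases h : (1 : Int) < n
  · have h1 : ((['1'] : List Char).length : Int) < n := by simp; omega
    have := pvFibA_eq_ref n n.toNat ['1'] 0 1 (by simp) h1
    rw [this]
    congr 1
    omega
  · have h1 : ¬ (((['1'] : List Char).length : Int) < n) := by simp; omega
    rw [pvFibA, pvFibRef]
    simp only [h1, dif_neg, not_false_iff]
    have : (max 1 n).toNat = 1 := by omega
    rw [this]
    rfl

-- B's counting pass followed by its emission pass replays exactly the
-- reference loop: the tally mirrors the flattened length of parts.
theorem pvCount_emit (n : Int) : ∀ (k : Nat) (tally : Int) (a b : Int) (parts : List (List Char)),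
    (n - tally).toNat ≤ k → tally = (parts.flatten.length : Int) →
    (pvEmitB (pvCountB n tally a b) a b parts).flatten = pvFibRef n parts.flatten a b := by
  intro k
  induction k with
  | zero =>
    intro tally a b parts hk ht
    rw [pvCountB, pvFibRef]
    rw [show b + a = a + b from add_comm b a]
    have h1 : ¬ tally < n := by omega
    have h2 : ¬ ((parts.flatten.length : Int) < n) := by omega
    simp only [h1, h2, dif_neg, not_false_iff]
    rfl
  | succ k ih =>
    intro tally a b parts hk ht
    rw [pvCountB, pvFibRef]
    rw [show b + a = a + b from add_comm b a]
    by_cases h : tally < n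
    · have h2 : (parts.flatten.length : Int) < n := by omega
      simp only [h, h2, dif_pos]
      have hstep : pvEmitB (pvCountB n (tally + ((PySem.Int.toChars (a + b)).length : Int)) b (a + b) + 1) a b parts
          = pvEmitB (pvCountB n (tally + ((PySem.Int.toChars (a + b)).length : Int)) b (a + b)) b (a + b) (parts ++ [PySem.Int.toChars (a + b)]) := rfl
      rw [hstep]
      have hdpos : 0 < (PySem.Int.toChars (a + b)).length := List.length_pos_of_ne_nil (pvToChars_ne_nil _)
      have := ih (tally + ((PySem.Int.toChars (a + b)).length : Int)) b (a + b) (parts ++ [PySem.Int.toChars (a + b)])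
        (by omega) (by simp only [List.flatten_append, List.flatten_cons, List.flatten_nil, List.append_nil, List.length_append]; omega)
      rw [this]
      congr 1
      simp
    · have h2 : ¬ ((parts.flatten.length : Int) < n) := by omega
      simp only [h, h2, dif_neg, not_false_iff]
      rfl

theorem pvKeyB (n : Int) : (pvEmitB (pvCountB n 1 0 1) 0 1 [['1']]).flatten = pvFibRef n ['1'] 0 1 := by
  have := pvCount_emit n (n - 1).toNat 1 0 1 [['1']] (by omega) (by simp)
  simpa using this

-- ===== VERDICT (by name: the statement is the Claim_ definition above) =====
theorem generate_fibonacci_spec : Claim_equal_generate_fibonacci := by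
  intro n r _
  simp only [Spec_generate_fibonacci, generate_fibonacci, generate_fibonacci_alt]
  rw [pvKeyB n, pvKeyA n]
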